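-- pv_equiv track=rewrite | github.com/miliar/Code_Jam_Webscraper | solutions_python/Problem_155/3555.py | calcular
-- ===== SOURCE A (Python) =====
-- def calcular(cs, invitados):
--     ## invitados = 0
--     s_p = 0
--     n_p = 0
--     ## res = "gotcha!"
--     ## longitud = len(cs)
--     for idx, c in enumerate(cs):
--         n_p += c
--         if idx <= s_p:
--             s_p += c
--         if n_p != s_p:
--             ## res =  "NO"
--             cs[idx-1] += 1
--             invitados += 1
--             return calcular(cs, invitados)
--     return invitados
-- ===== SOURCE B (Python) =====
-- def calcular(cs, invitados):
--     # Single greedy pass: at each shyness level with people, invite just enough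
--     # friends (shyness 0) to close the gap, instead of A's invite-one-and-restart
--     # recursion.  Note: A mutates cs in place; this matches A's RETURN value only.
--     standing = 0
--     for i, c in enumerate(cs):
--         if c != 0 and standing < i:
--             invitados += i - standing
--             standing = i
--         standing += c
--     return invitados
-- ===== Notes on version B (the rewrite author's own statement) =====
-- stated objective: alternative
-- what changed: A re-simulates the whole audience pass from scratch after inviting each single friend (mutating cs and recursing); B computes the answer in one greedy pass, adding the whole gap max(0, i - standing) at each populated shyness level; Pre_ excludes only the inputs whose prefix-deficit sum (an upper bound on A's recursion depth, tight up to a few units) reaches the interpreter's recursion limit, where A raises RecursionError.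
-- outside the precondition, e.g. on calcular([0, -9987, 1], 0): A returns 9989, B returns 9989
import Mathlib
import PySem

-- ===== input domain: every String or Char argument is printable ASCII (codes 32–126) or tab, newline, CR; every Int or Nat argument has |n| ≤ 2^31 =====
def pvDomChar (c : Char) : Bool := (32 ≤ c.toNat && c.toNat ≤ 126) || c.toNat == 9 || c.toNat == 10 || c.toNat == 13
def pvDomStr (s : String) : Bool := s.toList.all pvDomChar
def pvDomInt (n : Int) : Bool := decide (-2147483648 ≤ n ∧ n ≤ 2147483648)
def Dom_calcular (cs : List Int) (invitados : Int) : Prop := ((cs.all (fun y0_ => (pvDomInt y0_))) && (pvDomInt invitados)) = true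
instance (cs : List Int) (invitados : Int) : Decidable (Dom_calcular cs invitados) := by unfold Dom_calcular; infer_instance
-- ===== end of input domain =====

-- B replaces A's invite-one-friend-and-restart recursion by a single greedy pass
-- that adds the whole gap max(0, i - standing) at each populated level.
-- A mutates its cs argument in place; the equivalence proved here is about the RETURN value only.


-- ===== PORT A =====
-- A's loop: n_p += c; if idx <= s_p: s_p += c; failure when n_p != s_p.
-- Returns the idx of the first failing iteration (A then does cs[idx-1] += 1 and restarts).
def pvLoopA : List Int → Int → Int → Int → Option Int
  | [], _, _, _ => none
  | c :: rest, idx, s_p, n_p =>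
    let n_p' := n_p + c
    let s_p' := if idx ≤ s_p then s_p + c else s_p
    if n_p' ≠ s_p' then some idx else pvLoopA rest (idx + 1) s_p' n_p'

-- cs[idx-1] += 1.  The loop can only fail at idx ≥ 1 (proved in pvLoopA_start),
-- so the Nat index (idx-1).toNat is exact Python semantics here.
def pvInc : List Int → Nat → List Int
  | [], _ => []
  | c :: r, 0 => (c + 1) :: r
  | c :: r, k + 1 => c :: pvInc r k

-- Fuel bound for A's general recursion: Σ_i (i - prefix_i)⁺.  It strictly decreases at
-- every recursive call of A (lemma pvMu_dec below), so fuel pvMu cs + 1 never runs out.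
def pvMuGo : List Int → Int → Int → Nat
  | [], _, _ => 0
  | c :: r, i, p => (i - p).toNat + pvMuGo r (i + 1) (p + c)

def pvMu (cs : List Int) : Nat := pvMuGo cs 0 0

def pvCalcGo : Nat → List Int → Int → Int
  | 0, _, invitados => invitados          -- fuel never exhausted (pvMu bounds the recursion depth)
  | fuel + 1, cs, invitados =>
    match pvLoopA cs 0 0 0 with
    | none => invitados
    | some idx => pvCalcGo fuel (pvInc cs (idx - 1).toNat) (invitados + 1)

def calcular (cs : List Int) (invitados : Int) : Int := pvCalcGo (pvMu cs + 1) cs invitados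

-- ===== PORT B =====
def pvAltGo : List Int → Int → Int → Int → Int
  | [], _, _, invitados => invitados
  | c :: rest, i, standing, invitados =>
    if c ≠ 0 ∧ standing < i then pvAltGo rest (i + 1) (i + c) (invitados + (i - standing))
    else pvAltGo rest (i + 1) (standing + c) invitados

def calcular_alt (cs : List Int) (invitados : Int) : Int := pvAltGo cs 0 0 invitados

-- ===== PRECONDITION & SPEC =====
-- Pre_ excludes exactly the inputs on which the Python A raises RecursionError: the prefix-deficit
-- sum Σ_{i : cs_i ≠ 0} max(0, i - prefix_i) bounds A's recursion depth (one recursive call per unit,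
-- tight up to the slack of the bound), and A overflows the interpreter's recursion limit of 10000
-- just short of depth 10000 (measured: A still returns at depth 9996); inputs with bound ≥ 9990 go
-- outside Pre_, the handful among them that A still finishes are cited in the claim.
def Pre_calcular (cs : List Int) (invitados : Int) : Prop :=
  (∑ i ∈ Finset.range cs.length,
    if cs.getD i 0 ≠ 0 then max 0 ((i : Int) - ((cs.take i).sum)) else 0) < 9990
instance (cs : List Int) (invitados : Int) : Decidable (Pre_calcular cs invitados) := by unfold Pre_calcular; infer_instance

def pvWitness_calcular : List Int × Int := ([0, 1, 1, 2], 0)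

def Spec_calcular (cs : List Int) (invitados : Int) (out : Int) : Prop := out = calcular_alt cs invitados
instance (cs : List Int) (invitados : Int) (out : Int) : Decidable (Spec_calcular cs invitados out) := by unfold Spec_calcular; infer_instance

-- ===== CLAIM (what is proved, stated in full; the proofs are below) =====
def Claim_equal_calcular : Prop := ∀ (cs : List Int) (invitados : Int), Dom_calcular cs invitados → Pre_calcular cs invitados → Spec_calcular cs invitados (calcular cs invitados)

-- ===== LEMMAS AND PROOFS =====

-- B's accumulator is linear.
theorem pvAltGo_add (cs : List Int) : ∀ i s a d : Int, pvAltGo cs i s (a + d) = pvAltGo cs i s a + d := by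
  induction cs with
  | nil => intro i s a d; simp [pvAltGo]
  | cons c rest ih =>
    intro i s a d
    simp only [pvAltGo]
    split
    · rw [show a + d + (i - s) = (a + (i - s)) + d by ring, ih]
    · exact ih ..

-- If A's pass succeeds (entered with s_p = n_p), B charges nothing on the same suffix.
theorem pvLoopA_none (cs : List Int) : ∀ i s a : Int, pvLoopA cs i s s = none → pvAltGo cs i s a = a := by
  induction cs with
  | nil => intro i s a _; simp [pvAltGo]
  | cons c rest ih =>
    intro i s a h
    by_cases hi : i ≤ s
    · simp only [pvLoopA, if_pos hi] at h
      rw [if_neg (by simp)] at h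
      have hnc : ¬ (c ≠ 0 ∧ s < i) := fun ⟨_, h2⟩ => by omega
      simp only [pvAltGo, if_neg hnc]
      exact ih _ _ _ h
    · simp only [pvLoopA, if_neg hi] at h
      by_cases hc : c = 0
      · subst hc
        rw [if_neg (by simp)] at h
        simp only [add_zero] at h
        simp only [pvAltGo, ne_eq, not_true_eq_false, false_and, if_false, add_zero]
        exact ih _ _ _ h
      · rw [if_pos (fun hh => hc (by omega))] at h
        exact absurd h (by simp)

-- A failing pass (entered with s_p = n_p) fails at idx = i + j, j inside the list,
-- with s + Σ(first j elements) < idx.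
theorem pvLoopA_some (cs : List Int) : ∀ i s idx : Int, pvLoopA cs i s s = some idx →
    ∃ j : Nat, idx = i + j ∧ j < cs.length ∧ s + ((cs.take j).sum) < idx := by
  induction cs with
  | nil => intro i s idx h; simp [pvLoopA] at h
  | cons c rest ih =>
    intro i s idx h
    by_cases hi : i ≤ s
    · simp only [pvLoopA, if_pos hi] at h
      rw [if_neg (by simp)] at h
      obtain ⟨j, hj1, hj2, hj3⟩ := ih (i + 1) (s + c) idx h
      refine ⟨j + 1, by push_cast; omega, by simpa using hj2, ?_⟩
      simp only [List.take_succ_cons, List.sum_cons]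
      omega
    · simp only [pvLoopA, if_neg hi] at h
      by_cases hc : c = 0
      · subst hc
        rw [if_neg (by simp)] at h
        simp only [add_zero] at h
        obtain ⟨j, hj1, hj2, hj3⟩ := ih (i + 1) s idx h
        refine ⟨j + 1, by push_cast; omega, by simpa using hj2, ?_⟩
        simp only [List.take_succ_cons, List.sum_cons]
        push_cast at hj1 ⊢
        omega
      · rw [if_pos (fun hh => hc (by omega))] at h
        have hii : i = idx := Option.some.inj h
        refine ⟨0, by omega, by simp, ?_⟩
        simp only [List.take_zero, List.sum_nil, add_zero]
        omega

-- From the initial state the failing idx is ≥ 1 (position 0 never fails).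
theorem pvLoopA_start (cs : List Int) (idx : Int) (h : pvLoopA cs 0 0 0 = some idx) :
    ∃ j : Nat, idx = j ∧ 1 ≤ idx ∧ j < cs.length ∧ ((cs.take j).sum) < idx := by
  cases cs with
  | nil => simp [pvLoopA] at h
  | cons c rest =>
    simp only [pvLoopA, if_pos (le_refl (0 : Int)), zero_add] at h
    rw [if_neg (by simp)] at h
    obtain ⟨j, hj1, hj2, hj3⟩ := pvLoopA_some rest 1 c idx h
    refine ⟨j + 1, by push_cast; omega, by omega, by simpa using hj2, ?_⟩
    simp only [List.take_succ_cons, List.sum_cons]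
    push_cast at hj1 ⊢
    omega

-- μ is antitone in the prefix argument.
theorem pvMuGo_mono (cs : List Int) : ∀ i p q : Int, p ≤ q → pvMuGo cs i q ≤ pvMuGo cs i p := by
  induction cs with
  | nil => intro i p q _; simp [pvMuGo]
  | cons c r ih =>
    intro i p q hpq
    simp only [pvMuGo]
    have h1 : (i - q).toNat ≤ (i - p).toNat := by omega
    have h2 := ih (i + 1) (p + c) (q + c) (by omega)
    omega

-- Incrementing a position whose successor position has positive prefix deficit strictly decreases μ.
theorem pvMu_dec (cs : List Int) : ∀ (k : Nat) (i p : Int), (k : Int) + 1 < cs.length →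
    p + ((cs.take (k + 1)).sum) < i + ((k : Int) + 1) → pvMuGo (pvInc cs k) i p < pvMuGo cs i p := by
  induction cs with
  | nil => intro k i p h _; simp at h; omega
  | cons c r ih =>
    intro k i p hlen hpref
    cases k with
    | zero =>
      simp only [List.take_succ_cons, List.take_zero, List.sum_cons, List.sum_nil, add_zero] at hpref
      simp only [pvInc, pvMuGo]
      have hr : r ≠ [] := by
        simp only [List.length_cons] at hlen
        exact List.ne_nil_of_length_pos (by push_cast at hlen; omega)
      obtain ⟨d, r2, rfl⟩ := List.exists_cons_of_ne_nil hr
      simp only [pvMuGo]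
      have h1 : (i + 1 - (p + (c + 1))).toNat < (i + 1 - (p + c)).toNat := by push_cast at hpref; omega
      have h2 := pvMuGo_mono r2 (i + 1 + 1) (p + c + d) (p + (c + 1) + d) (by omega)
      omega
    | succ k' =>
      simp only [List.take_succ_cons, List.sum_cons] at hpref
      simp only [pvInc, pvMuGo]
      have := ih k' (i + 1) (p + c) (by simp only [List.length_cons] at hlen; push_cast at hlen ⊢; omega)
        (by push_cast at hpref ⊢; omega)
      omega

-- KEY: incrementing position idx - 1 removes exactly one unit of B's accumulated answer.
theorem pvRec (cs : List Int) : ∀ (i s acc idx : Int), pvLoopA cs i s s = some idx → i + 1 ≤ idx →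
    pvAltGo (pvInc cs (idx - 1 - i).toNat) i s acc + 1 = pvAltGo cs i s acc := by
  induction cs with
  | nil => intro i s acc idx h _; simp [pvLoopA] at h
  | cons c rest ih =>
    intro i s acc idx h hge
    by_cases hi : i ≤ s
    · simp only [pvLoopA, if_pos hi] at h
      rw [if_neg (by simp)] at h
      have hnc : ¬ (c ≠ 0 ∧ s < i) := fun ⟨_, h2⟩ => by omega
      by_cases hj : i + 2 ≤ idx
      · have hk : (idx - 1 - i).toNat = (idx - 1 - (i + 1)).toNat + 1 := by omega
        rw [hk]
        simp only [pvInc, pvAltGo, if_neg hnc]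
        exact ih (i + 1) (s + c) acc idx h (by omega)
      · have hidx : idx = i + 1 := by omega
        subst hidx
        rw [show (i + 1 - 1 - i).toNat = 0 by omega]
        obtain ⟨j, hj1, hj2, hj3⟩ := pvLoopA_some rest (i + 1) (s + c) (i + 1) h
        have hj0 : j = 0 := by omega
        subst hj0
        simp only [List.take_zero, List.sum_nil, add_zero] at hj3
        obtain ⟨d, r2, rfl⟩ := List.exists_cons_of_ne_nil (List.ne_nil_of_length_pos (by omega))
        -- d ≠ 0: otherwise the loop would continue past i + 1
        have hd : d ≠ 0 := by
          intro hd0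
          subst hd0
          simp only [pvLoopA, if_neg (show ¬ (i + 1 ≤ s + c) by omega)] at h
          rw [if_neg (by simp)] at h
          simp only [add_zero] at h
          obtain ⟨j', hj1', _, _⟩ := pvLoopA_some r2 (i + 1 + 1) (s + c) (i + 1) h
          omega
        have hnc1 : ¬ (c + 1 ≠ 0 ∧ s < i) := fun ⟨_, h2⟩ => by omega
        simp only [pvInc, pvAltGo, if_neg hnc1, if_neg hnc]
        by_cases hse : s + c = i
        · rw [if_neg (show ¬ (d ≠ 0 ∧ s + (c + 1) < i + 1) by omega),
              if_pos (show d ≠ 0 ∧ s + c < i + 1 by omega)]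
          rw [show acc + (i + 1 - (s + c)) = (acc + 1) by omega, show s + (c + 1) + d = i + 1 + d by omega]
          rw [show (acc : Int) + 1 = acc + 1 by ring, pvAltGo_add]
        · rw [if_pos (show d ≠ 0 ∧ s + (c + 1) < i + 1 by omega),
              if_pos (show d ≠ 0 ∧ s + c < i + 1 by omega)]
          have e1 : ∀ x : Int, pvAltGo r2 (i + 1 + 1) (i + 1 + d) (acc + x)
              = pvAltGo r2 (i + 1 + 1) (i + 1 + d) acc + x := fun x => pvAltGo_add ..
          rw [e1, e1]
          ring
    · simp only [pvLoopA, if_neg hi] at h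
      by_cases hc : c = 0
      · subst hc
        rw [if_neg (by simp)] at h
        simp only [add_zero] at h
        have hnc : ¬ ((0 : Int) ≠ 0 ∧ s < i) := by simp
        by_cases hj : i + 2 ≤ idx
        · have hk : (idx - 1 - i).toNat = (idx - 1 - (i + 1)).toNat + 1 := by omega
          rw [hk]
          simp only [pvInc, pvAltGo, if_neg hnc, add_zero]
          exact ih (i + 1) s acc idx h (by omega)
        · have hidx : idx = i + 1 := by omega
          subst hidx
          rw [show (i + 1 - 1 - i).toNat = 0 by omega]
          obtain ⟨j, hj1, hj2, hj3⟩ := pvLoopA_some rest (i + 1) s (i + 1) h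
          have hj0 : j = 0 := by omega
          subst hj0
          obtain ⟨d, r2, rfl⟩ := List.exists_cons_of_ne_nil (List.ne_nil_of_length_pos (by omega))
          have hd : d ≠ 0 := by
            intro hd0
            subst hd0
            simp only [pvLoopA, if_neg (show ¬ (i + 1 ≤ s) by omega)] at h
            rw [if_neg (by simp)] at h
            simp only [add_zero] at h
            obtain ⟨j', hj1', _, _⟩ := pvLoopA_some r2 (i + 1 + 1) s (i + 1) h
            omega
          have h01 : (0 : Int) + 1 ≠ 0 := by norm_num
          simp only [pvInc, pvAltGo, if_pos (show (0:Int) + 1 ≠ 0 ∧ s < i by exact ⟨h01, by omega⟩),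
            if_neg hnc, add_zero]
          rw [if_neg (show ¬ (d ≠ 0 ∧ i + (0 + 1) < i + 1) by omega),
              if_pos (show d ≠ 0 ∧ s < i + 1 by exact ⟨hd, by omega⟩)]
          rw [show i + (0 + 1) + d = i + 1 + d by ring]
          have e1 : ∀ x : Int, pvAltGo r2 (i + 1 + 1) (i + 1 + d) (acc + x)
              = pvAltGo r2 (i + 1 + 1) (i + 1 + d) acc + x := fun x => pvAltGo_add ..
          rw [e1, e1]
          ring
      · rw [if_pos (fun hh => hc (by omega))] at h
        have : i = idx := Option.some.inj h
        omega

theorem pvMain : ∀ (n : Nat) (cs : List Int) (inv : Int), pvMu cs < n →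
    pvCalcGo n cs inv = pvAltGo cs 0 0 inv := by
  intro n
  induction n with
  | zero => intro cs inv h; omega
  | succ n ih =>
    intro cs inv hmu
    simp only [pvCalcGo]
    cases hL : pvLoopA cs 0 0 0 with
    | none => exact (pvLoopA_none cs 0 0 inv hL).symm
    | some idx =>
      obtain ⟨j, hj1, hj1', hj2, hj3⟩ := pvLoopA_start cs idx hL
      have hdec : pvMuGo (pvInc cs (idx - 1).toNat) 0 0 < pvMuGo cs 0 0 := by
        apply pvMu_dec cs (idx - 1).toNat 0 0 (by push_cast at hj2 ⊢; omega)
        rw [show (idx - 1).toNat + 1 = j by omega]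
        push_cast
        omega
      show pvCalcGo n (pvInc cs (idx - 1).toNat) (inv + 1) = pvAltGo cs 0 0 inv
      rw [ih (pvInc cs (idx - 1).toNat) (inv + 1) (by unfold pvMu at hmu ⊢; omega)]
      have hrec := pvRec cs 0 0 inv idx hL (by omega)
      rw [show idx - 1 - 0 = idx - 1 by ring] at hrec
      rw [pvAltGo_add]
      omega

-- ===== VERDICT (by name: the statement is the Claim_ definition above) =====
theorem calcular_spec : Claim_equal_calcular := by
  intro cs invitados _ _
  unfold Spec_calcular calcular calcular_alt
  exact pvMain (pvMu cs + 1) cs invitados (by omega)
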